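-- pv_equiv track=rewrite | github.com/larryhastings/big | tests/test_text.py | toy_multisplit_original
-- ===== SOURCE A (Python) =====
-- def toy_multisplit_original(s, separators): # pragma: no cover
--     """
--     The original toy version of multisplit.
--     I keep it around as a *third* implementation of multisplit,
--     to make sure all three agree.  (The new toy_multisplit
--     is usually faster though.)
--
--     s is str or bytes.
--     separators is str or bytes, or an iterable of str or bytes.
--
--     Returns a list equivalent to
--         list(big.multisplit(s, separators, keep=ALTERNATING, separate=True))
--
--     (Doesn't support any other arguments--maxsplit etc.)
--     """
--
--     segments = []
--     word = []
--
--     if isinstance(s, bytes):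
--         empty = b''
--     else:
--         empty = ''
--
--     if isinstance(separators, (str, bytes)):
--         separators = (separators,)
--     # assert empty not in separators
--
--     def flush_word():
--         segments.append(empty.join(word))
--         word.clear()
--
--     while s:
--         longest_separator_length = 0
--         longest_separator = None
--         for sep in separators:
--             length = len(sep)
--             if s.startswith(sep) and (length > longest_separator_length):
--                 longest_separator = sep
--                 longest_separator_length = length
--         if longest_separator:
--             flush_word()
--             segments.append(longest_separator)
--             s = s[longest_separator_length:]
--             continue
--         word.append(s[:1])
--         s = s[1:]
--     flush_word()
--
--     return segments
-- ===== SOURCE B (Python) =====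
-- def toy_multisplit_original(s, separators):
--     """Alternative multisplit: index a set of separators by length once, then
--     scan s once, probing at each position the few possible lengths (longest
--     first) with a hash lookup instead of testing every separator."""
--     if isinstance(separators, (str, bytes)):
--         separators = (separators,)
--     sepset = {sep for sep in separators if sep}
--     lengths = sorted({len(sep) for sep in sepset}, reverse=True)
--     segments = []
--     n = len(s)
--     w = i = 0
--     while i < n:
--         m = None
--         for L in lengths:
--             if i + L <= n and s[i:i+L] in sepset:
--                 m = s[i:i+L]
--                 break
--         if m is None:
--             i += 1
--         else:
--             segments.append(s[w:i])
--             segments.append(m)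
--             i += len(m)
--             w = i
--     segments.append(s[w:])
--     return segments
-- ===== Notes on version B (the rewrite author's own statement) =====
-- stated objective: faster
-- what changed: Instead of testing every separator with startswith at each position (while repeatedly copying the remainder via s = s[1:]) and joining one-character pieces, B builds a hash set of the non-empty separators plus a descending list of their distinct lengths once, then scans s by index, probing each position with one set lookup per distinct length (longest first) and emitting words as direct slices of s.
import Mathlib
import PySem

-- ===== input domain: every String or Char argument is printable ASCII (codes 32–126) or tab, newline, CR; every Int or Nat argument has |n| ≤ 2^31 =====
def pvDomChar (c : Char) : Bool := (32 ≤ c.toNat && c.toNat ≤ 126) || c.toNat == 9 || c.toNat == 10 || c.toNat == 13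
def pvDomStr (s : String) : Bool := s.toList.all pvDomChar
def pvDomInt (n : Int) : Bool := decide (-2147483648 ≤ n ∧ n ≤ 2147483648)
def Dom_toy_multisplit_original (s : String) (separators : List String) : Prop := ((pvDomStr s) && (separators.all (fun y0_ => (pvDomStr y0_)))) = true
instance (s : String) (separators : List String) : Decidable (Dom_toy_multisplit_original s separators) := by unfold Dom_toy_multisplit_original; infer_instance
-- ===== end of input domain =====

-- B replaces A's per-position startswith scan over all separators (and A's repeated
-- re-slicing s = s[1:]) by a hash set of separators probed per distinct length with an
-- index scan over s; return values proved equal on all inputs (measured faster).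

-- ===== PORT A =====
-- inner 'for sep in separators' loop: running (longest_separator_length, longest_separator)
def pvBestA (t : List Char) (seps : List (List Char)) : Nat × Option (List Char) :=
  seps.foldl (fun acc sep =>
    if sep.isPrefixOf t ∧ acc.1 < sep.length then (sep.length, some sep) else acc)
    (0, none)

-- the 'while s:' loop; fuel = initial length of s (each step consumes ≥ 1 char)
def pvLoopA (seps : List (List Char)) : Nat → List Char → List (List Char) → List (List Char) → List (List Char)
  | _, [], segs, word => segs ++ [word.flatten]
  | 0, _ :: _, segs, word => segs ++ [word.flatten]   -- unreachable: fuel ≥ length of t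
  | f + 1, t, segs, word =>
    match (pvBestA t seps).2 with
    | some sep => pvLoopA seps f (t.drop (pvBestA t seps).1) (segs ++ [word.flatten, sep]) []
    | none => pvLoopA seps f (t.drop 1) segs (word ++ [t.take 1])

def toy_multisplit_original (s : String) (separators : List String) : List String :=
  let cs := s.toList
  let seps := separators.map String.toList
  (pvLoopA seps cs.length cs [] []).map String.mk

-- ===== PORT B =====
-- 'for L in lengths' probe at position i: first (longest) length whose slice is a separator
def pvScanB (sepset : PySem.Set (List Char)) (cs : List Char) (n i : Nat) : List Nat → Option (List Char)
  | [] => none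
  | L :: rest =>
    if i + L ≤ n ∧ PySem.List.slice cs (some (i : Int)) (some ((i : Int) + (L : Int))) ∈ sepset then
      some (PySem.List.slice cs (some (i : Int)) (some ((i : Int) + (L : Int))))
    else pvScanB sepset cs n i rest

-- the 'while i < n' loop; fuel = n (i grows by ≥ 1 each step)
def pvLoopB (sepset : PySem.Set (List Char)) (lengths : List Nat) (cs : List Char) (n : Nat) :
    Nat → Nat → Nat → List (List Char) → List (List Char)
  | 0, _, w, segs => segs ++ [PySem.List.slice cs (some (w : Int)) none]
  | f + 1, i, w, segs =>
    if i < n then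
      match pvScanB sepset cs n i lengths with
      | none => pvLoopB sepset lengths cs n f (i + 1) w segs
      | some m =>
          pvLoopB sepset lengths cs n f (i + m.length) (i + m.length)
            (segs ++ [PySem.List.slice cs (some (w : Int)) (some (i : Int)), m])
    else segs ++ [PySem.List.slice cs (some (w : Int)) none]

def toy_multisplit_original_alt (s : String) (separators : List String) : List String :=
  let cs := s.toList
  let sepset : PySem.Set (List Char) :=
    PySem.Set.ofList ((separators.map String.toList).filter (fun sep => sep ≠ []))
  let lengths : List Nat :=
    PySem.List.sorted (PySem.Set.ofList (sepset.map List.length)) (fun x => x) true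
  (pvLoopB sepset lengths cs cs.length cs.length 0 0 []).map String.mk

-- ===== PRECONDITION & SPEC =====
def Spec_toy_multisplit_original (s : String) (separators : List String) (out : List String) : Prop := out = toy_multisplit_original_alt s separators
instance (s : String) (separators : List String) (out : List String) : Decidable (Spec_toy_multisplit_original s separators out) := by unfold Spec_toy_multisplit_original; infer_instance

-- ===== CLAIM (what is proved, stated in full; the proofs are below) =====
def Claim_equal_toy_multisplit_original : Prop := ∀ (s : String) (separators : List String), Dom_toy_multisplit_original s separators → Spec_toy_multisplit_original s separators (toy_multisplit_original s separators)


-- ===== LEMMAS AND PROOFS =====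

-- lengths of the separators among `seps` that match (are a prefix of) `t`
def pvMatchLens (t : List Char) (seps : List (List Char)) : List Nat :=
  (seps.filter (fun sep => sep.isPrefixOf t)).map List.length

-- the longest matching separator length (0 = no match)
def pvMM (t : List Char) (seps : List (List Char)) : Nat :=
  (pvMatchLens t seps).foldl max 0

theorem pvMatchLens_le (t : List Char) (seps : List (List Char)) :
    ∀ L ∈ pvMatchLens t seps, L ≤ t.length := by
  intro L hL
  simp only [pvMatchLens, List.mem_map, List.mem_filter] at hL
  obtain ⟨sep, ⟨_, hpre⟩, rfl⟩ := hL
  exact (List.isPrefixOf_iff_prefix.mp hpre).length_le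

theorem pvFoldlMax_le (ls : List Nat) (c : Nat) (h : ∀ L ∈ ls, L ≤ c) :
    ∀ m, m ≤ c → ls.foldl max m ≤ c := by
  induction ls with
  | nil => intro m hm; exact hm
  | cons L rest ih =>
    intro m hm
    exact ih (fun x hx => h x (List.mem_cons_of_mem _ hx)) (max m L)
      (max_le hm (h L (List.mem_cons_self)))

theorem pvFoldlMax_cases (ls : List Nat) : ∀ m, ls.foldl max m = m ∨ ls.foldl max m ∈ ls := by
  induction ls with
  | nil => intro m; exact Or.inl rfl
  | cons L rest ih =>
    intro m
    rcases ih (max m L) with h | h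
    · rcases Nat.le_total m L with hle | hle
      · exact Or.inr (by rw [List.foldl_cons, h]; simp [Nat.max_eq_right hle])
      · exact Or.inl (by rw [List.foldl_cons, h]; exact Nat.max_eq_left hle)
    · exact Or.inr (List.mem_cons_of_mem _ h)

theorem pvMM_le (t : List Char) (seps : List (List Char)) : pvMM t seps ≤ t.length :=
  pvFoldlMax_le _ _ (pvMatchLens_le t seps) 0 (Nat.zero_le _)

-- A's inner foldl computes the longest matching separator, which is t.take (pvMM t seps)
theorem pvBestA_gen (t : List Char) (seps : List (List Char)) :
    ∀ m : Nat, m ≤ t.length →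
    List.foldl (fun acc sep =>
        if sep.isPrefixOf t ∧ acc.1 < sep.length then (sep.length, some sep) else acc)
      (m, if m = 0 then none else some (t.take m)) seps
    = ((pvMatchLens t seps).foldl max m,
       if (pvMatchLens t seps).foldl max m = 0 then none
       else some (t.take ((pvMatchLens t seps).foldl max m))) := by
  induction seps with
  | nil => intro m _; simp [pvMatchLens]
  | cons sep rest ih =>
    intro m hm
    by_cases hpre : sep.isPrefixOf t = true
    · have hml : pvMatchLens t (sep :: rest) = sep.length :: pvMatchLens t rest := by
        simp [pvMatchLens, hpre]
      by_cases hlt : m < sep.length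
      · have hsep : sep = t.take sep.length := List.prefix_iff_eq_take.mp
          (List.isPrefixOf_iff_prefix.mp hpre)
        have h1 : sep.length ≠ 0 := by omega
        have h2 : sep.length ≤ t.length := (List.isPrefixOf_iff_prefix.mp hpre).length_le
        rw [List.foldl_cons, if_pos ⟨hpre, hlt⟩, hml, List.foldl_cons]
        have := ih sep.length h2
        rw [if_neg h1] at this
        rw [show some sep = some (t.take sep.length) from by rw [← hsep]]
        rw [this, Nat.max_eq_right (Nat.le_of_lt hlt)]
      · rw [List.foldl_cons, if_neg (by rintro ⟨_, h⟩; exact hlt h), hml, List.foldl_cons,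
          Nat.max_eq_left (by omega)]
        exact ih m hm
    · have hml : pvMatchLens t (sep :: rest) = pvMatchLens t rest := by
        simp [pvMatchLens, hpre]
      rw [List.foldl_cons, if_neg (by rintro ⟨h, _⟩; exact hpre h), hml]
      exact ih m hm

theorem pvBestA_eq (t : List Char) (seps : List (List Char)) :
    pvBestA t seps
    = (pvMM t seps, if pvMM t seps = 0 then none else some (t.take (pvMM t seps))) := by
  have := pvBestA_gen t seps 0 (Nat.zero_le _)
  simpa [pvBestA, pvMM] using this

-- B's probe loop: no length matches
theorem pvScanB_none (sepset : PySem.Set (List Char)) (cs : List Char) (n i : Nat) :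
    ∀ ls : List Nat,
    (∀ L ∈ ls, ¬ (i + L ≤ n ∧
        PySem.List.slice cs (some (i : Int)) (some ((i : Int) + (L : Int))) ∈ sepset)) →
    pvScanB sepset cs n i ls = none := by
  intro ls
  induction ls with
  | nil => intro _; rfl
  | cons L rest ih =>
    intro h
    rw [pvScanB, if_neg (h L (List.mem_cons_self))]
    exact ih (fun x hx => h x (List.mem_cons_of_mem _ hx))

-- B's probe loop: the first (longest) matching length wins
theorem pvScanB_first (sepset : PySem.Set (List Char)) (cs : List Char) (n i mm : Nat) :
    ∀ ls : List Nat, ls.Pairwise (· > ·) → mm ∈ ls →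
    (∀ L ∈ ls, (i + L ≤ n ∧
        PySem.List.slice cs (some (i : Int)) (some ((i : Int) + (L : Int))) ∈ sepset) → L ≤ mm) →
    (i + mm ≤ n ∧
        PySem.List.slice cs (some (i : Int)) (some ((i : Int) + (mm : Int))) ∈ sepset) →
    pvScanB sepset cs n i ls
      = some (PySem.List.slice cs (some (i : Int)) (some ((i : Int) + (mm : Int)))) := by
  intro ls
  induction ls with
  | nil => intro _ h; exact absurd h (List.not_mem_nil)
  | cons L rest ih =>
    intro hpw hmem hle hmm
    by_cases hLmm : L = mm
    · subst hLmm; rw [pvScanB, if_pos hmm]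
    · have hmem' : mm ∈ rest := by
        rcases List.mem_cons.mp hmem with h | h
        · exact absurd h.symm hLmm
        · exact h
      have hLgt : L > mm := (List.pairwise_cons.mp hpw).1 mm hmem'
      have hnL : ¬ (i + L ≤ n ∧
          PySem.List.slice cs (some (i : Int)) (some ((i : Int) + (L : Int))) ∈ sepset) := by
        intro h; exact absurd (hle L (List.mem_cons_self) h) (by omega)
      rw [pvScanB, if_neg hnL]
      exact ih (List.pairwise_cons.mp hpw).2 hmem'
        (fun x hx => hle x (List.mem_cons_of_mem _ hx)) hmm

-- Correspondence: for L ≥ 1, "the length-L slice of t is a (non-empty) separator"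
-- is exactly "L is a matching length in A's sense"
theorem pvCorr (t : List Char) (seps : List (List Char)) (L : Nat) (hL : 1 ≤ L) :
    (L ≤ t.length ∧ t.take L ∈ PySem.Set.ofList (seps.filter (fun sep => sep ≠ [])))
    ↔ L ∈ pvMatchLens t seps := by
  constructor
  · rintro ⟨hlen, hmem⟩
    rw [PySem.Set.mem_ofList] at hmem
    have hmem' := List.mem_filter.mp hmem
    simp only [pvMatchLens, List.mem_map, List.mem_filter]
    refine ⟨t.take L, ⟨hmem'.1, List.isPrefixOf_iff_prefix.mpr (List.take_prefix L t)⟩, ?_⟩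
    simp [hlen]
  · intro hmem
    simp only [pvMatchLens, List.mem_map, List.mem_filter] at hmem
    obtain ⟨sep, ⟨hsep, hpre⟩, rfl⟩ := hmem
    have hpre' := List.isPrefixOf_iff_prefix.mp hpre
    have hne : sep ≠ [] := by intro h; rw [h] at hL; simp at hL
    refine ⟨hpre'.length_le, ?_⟩
    rw [PySem.Set.mem_ofList, ← List.prefix_iff_eq_take.mp hpre']
    exact List.mem_filter.mpr ⟨hsep, by simp [hne]⟩

-- the descending distinct-length list B builds
theorem pvLengths_pos (seps : List (List Char)) :
    ∀ L ∈ PySem.List.sorted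
        (PySem.Set.ofList ((PySem.Set.ofList (seps.filter (fun sep => sep ≠ []))).map List.length))
        (fun x => x) true, 1 ≤ L := by
  intro L hL
  rw [PySem.List.mem_sorted, PySem.Set.mem_ofList, List.mem_map] at hL
  obtain ⟨sep, hsep, rfl⟩ := hL
  rw [PySem.Set.mem_ofList] at hsep
  have := (List.mem_filter.mp hsep).2
  simp at this
  cases sep with
  | nil => exact absurd rfl this
  | cons a l => simp

theorem pvLengths_dec (seps : List (List Char)) :
    (PySem.List.sorted
        (PySem.Set.ofList ((PySem.Set.ofList (seps.filter (fun sep => sep ≠ []))).map List.length))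
        (fun x => x) true).Pairwise (· > ·) := by
  have hnd : (PySem.List.sorted
      (PySem.Set.ofList ((PySem.Set.ofList (seps.filter (fun sep => sep ≠ []))).map List.length))
      (fun x => x) true).Nodup :=
    ((PySem.List.sorted_perm _ _ _).nodup_iff).mpr (PySem.Set.nodup_ofList _)
  have hpw := PySem.List.sorted_pairwise_rev
    (PySem.Set.ofList ((PySem.Set.ofList (seps.filter (fun sep => sep ≠ []))).map List.length))
    (fun x => x)
  exact (hpw.and hnd).imp (fun {a b} h => by omega)

theorem pvMem_lengths (seps : List (List Char)) {x : List Char}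
    (hx : x ∈ PySem.Set.ofList (seps.filter (fun sep => sep ≠ []))) :
    x.length ∈ PySem.List.sorted
      (PySem.Set.ofList ((PySem.Set.ofList (seps.filter (fun sep => sep ≠ []))).map List.length))
      (fun x => x) true := by
  rw [PySem.List.mem_sorted, PySem.Set.mem_ofList]
  exact List.mem_map.mpr ⟨x, hx, rfl⟩

-- B's probe at position i equals A's best-separator search on the suffix cs.drop i
theorem pvScan_eq_best (cs : List Char) (seps : List (List Char)) (i : Nat) (hi : i ≤ cs.length) :
    pvScanB (PySem.Set.ofList (seps.filter (fun sep => sep ≠ []))) cs cs.length i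
      (PySem.List.sorted
        (PySem.Set.ofList ((PySem.Set.ofList (seps.filter (fun sep => sep ≠ []))).map List.length))
        (fun x => x) true)
    = if pvMM (cs.drop i) seps = 0 then none
      else some ((cs.drop i).take (pvMM (cs.drop i) seps)) := by
  set t := cs.drop i with ht
  have htlen : t.length = cs.length - i := by rw [ht]; exact List.length_drop
  have hslice : ∀ L : Nat, PySem.List.slice cs (some (i : Int)) (some ((i : Int) + (L : Int)))
      = t.take L := by
    intro L; rw [PySem.List.slice_natCast_add, ht]
  have hpred : ∀ L : Nat, 1 ≤ L →
      ((i + L ≤ cs.length ∧ PySem.List.slice cs (some (i : Int)) (some ((i : Int) + (L : Int)))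
          ∈ PySem.Set.ofList (seps.filter (fun sep => sep ≠ [])))
        ↔ L ∈ pvMatchLens t seps) := by
    intro L hL
    rw [hslice L, show (i + L ≤ cs.length) ↔ L ≤ t.length from by omega]
    exact pvCorr t seps L hL
  by_cases hmm : pvMM t seps = 0
  · rw [if_pos hmm]
    apply pvScanB_none
    intro L hL hcond
    have h1 := pvLengths_pos seps L hL
    have h2 := (hpred L h1).mp hcond
    have := (PySem.List.le_foldl_max (pvMatchLens t seps) 0).2 L h2
    rw [show (pvMatchLens t seps).foldl max 0 = pvMM t seps from rfl, hmm] at this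
    omega
  · rw [if_neg hmm]
    have hmmS : pvMM t seps ∈ pvMatchLens t seps := by
      rcases pvFoldlMax_cases (pvMatchLens t seps) 0 with h | h
      · exact absurd h hmm
      · exact h
    have hmm1 : 1 ≤ pvMM t seps := by omega
    have hcond : i + pvMM t seps ≤ cs.length ∧
        PySem.List.slice cs (some (i : Int)) (some ((i : Int) + ((pvMM t seps : Nat) : Int)))
          ∈ PySem.Set.ofList (seps.filter (fun sep => sep ≠ [])) :=
      (hpred _ hmm1).mpr hmmS
    have hmem : pvMM t seps ∈ PySem.List.sorted
        (PySem.Set.ofList ((PySem.Set.ofList (seps.filter (fun sep => sep ≠ []))).map List.length))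
        (fun x => x) true := by
      have h2 := hcond.2
      rw [hslice] at h2
      have := pvMem_lengths seps h2
      rwa [List.length_take, htlen, Nat.min_eq_left (by have := pvMM_le t seps; omega)] at this
    rw [pvScanB_first _ cs cs.length i (pvMM t seps) _ (pvLengths_dec seps) hmem
      (fun L hL hc => (PySem.List.le_foldl_max (pvMatchLens t seps) 0).2 L
        ((hpred L (pvLengths_pos seps L hL)).mp hc)) hcond]
    rw [hslice]

-- the two main loops agree, given the word/slice invariant
theorem pvLoop_eq (cs : List Char) (seps : List (List Char)) :
    ∀ (fA : Nat) (fB i w : Nat) (segs word : List (List Char)),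
    w ≤ i → i ≤ cs.length → cs.length - i ≤ fA → cs.length - i ≤ fB →
    word.flatten = (cs.drop w).take (i - w) →
    pvLoopA seps fA (cs.drop i) segs word
    = pvLoopB (PySem.Set.ofList (seps.filter (fun sep => sep ≠ [])))
        (PySem.List.sorted
          (PySem.Set.ofList ((PySem.Set.ofList (seps.filter (fun sep => sep ≠ []))).map List.length))
          (fun x => x) true)
        cs cs.length fB i w segs := by
  intro fA
  induction fA with
  | zero =>
    intro fB i w segs word hwi hi hfA hfB hword
    have hin : i = cs.length := by omega
    have hdrop : cs.drop i = [] := by rw [hin]; simp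
    have hflush : word.flatten = cs.drop w := by
      rw [hword, List.take_of_length_le]
      rw [List.length_drop]; omega
    rw [hdrop, pvLoopA]
    cases fB with
    | zero => rw [pvLoopB, PySem.List.slice_from_natCast, hflush]
    | succ f =>
      rw [pvLoopB, if_neg (by omega), PySem.List.slice_from_natCast, hflush]
  | succ fA ih =>
    intro fB i w segs word hwi hi hfA hfB hword
    by_cases hin : i = cs.length
    · have hdrop : cs.drop i = [] := by rw [hin]; simp
      have hflush : word.flatten = cs.drop w := by
        rw [hword, List.take_of_length_le]
        rw [List.length_drop]; omega
      rw [hdrop, pvLoopA]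
      cases fB with
      | zero => rw [pvLoopB, PySem.List.slice_from_natCast, hflush]
      | succ f =>
        rw [pvLoopB, if_neg (by omega), PySem.List.slice_from_natCast, hflush]
    · have hilt : i < cs.length := by omega
      obtain ⟨c, rest, hcr⟩ : ∃ c rest, cs.drop i = c :: rest := by
        cases h : cs.drop i with
        | nil => exfalso; have := List.length_drop (l := cs) (i := i); rw [h] at this; simp at this; omega
        | cons c rest => exact ⟨c, rest, rfl⟩
      obtain ⟨fB', rfl⟩ : ∃ f, fB = f + 1 := ⟨fB - 1, by omega⟩
      have hA : pvLoopA seps (fA + 1) (cs.drop i) segs word =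
          match (pvBestA (cs.drop i) seps).2 with
          | some sep => pvLoopA seps fA ((cs.drop i).drop (pvBestA (cs.drop i) seps).1)
              (segs ++ [word.flatten, sep]) []
          | none => pvLoopA seps fA ((cs.drop i).drop 1) segs (word ++ [(cs.drop i).take 1]) := by
        rw [hcr]; rw [pvLoopA]; simp
      set t := cs.drop i with ht
      have htlen : t.length = cs.length - i := List.length_drop
      rw [hA, pvLoopB, if_pos hilt, pvScan_eq_best cs seps i (by omega), pvBestA_eq]
      by_cases hmm : pvMM t seps = 0
      · rw [if_pos hmm]
        simp only
        have hdrop1 : t.drop 1 = cs.drop (i + 1) := by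
          rw [ht, List.drop_drop, Nat.add_comm]
        rw [hdrop1]
        apply ih fB' (i + 1) w segs (word ++ [t.take 1]) (by omega) (by omega) (by omega) (by omega)
        rw [List.flatten_append, hword]
        have : t.take 1 = ((cs.drop w).drop (i - w)).take 1 := by
          rw [List.drop_drop, show w + (i - w) = i from by omega, ht]
        rw [this, show i + 1 - w = (i - w) + 1 from by omega, List.take_add]
        simp
      · rw [if_neg hmm]
        simp only
        have hmmle : pvMM t seps ≤ t.length := pvMM_le t seps
        have hlen : (t.take (pvMM t seps)).length = pvMM t seps := by
          rw [List.length_take, Nat.min_eq_left hmmle]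
        have hdropm : t.drop (pvMM t seps) = cs.drop (i + pvMM t seps) := by
          rw [ht, List.drop_drop, Nat.add_comm]
        have hmm1 : 1 ≤ pvMM t seps := by omega
        rw [hlen, hdropm, PySem.List.slice_natCast,
          show (cs.drop w).take (i - w) = word.flatten from hword.symm]
        apply ih fB' (i + pvMM t seps) (i + pvMM t seps) (segs ++ [word.flatten, t.take (pvMM t seps)]) []
          (by omega) (by omega) (by omega) (by omega)
        simp

-- ===== VERDICT (by name: the statement is the Claim_ definition above) =====
theorem toy_multisplit_original_spec : Claim_equal_toy_multisplit_original := by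
  intro s separators _
  unfold Spec_toy_multisplit_original toy_multisplit_original toy_multisplit_original_alt
  simp only []
  apply congrArg (List.map String.mk)
  have := pvLoop_eq s.toList (separators.map String.toList)
    s.toList.length s.toList.length 0 0 [] [] (le_refl 0) (Nat.zero_le _)
    (by omega) (by omega) (by simp)
  simpa using this
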